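-- pv_equiv track=rewrite | github.com/aabitbekov/Queue | mainapp/api/getCategory.py | getMainCategory
-- ===== SOURCE A (Python) =====
-- def getMainCategory(category='B, C1'):
--     index = 0
--     all_categories = ['A1', 'B1', 'A', 'B', 'C1', 'C', 'D1', 'D', 'BE', 'C1E', 'CE', 'D1E', 'DE']
--
--     categories_list = [category.replace(' ', '') for category in category.split(',')]
--
--     for category in categories_list:
--         if index < all_categories.index(category):
--             index = all_categories.index(category)
--
--     return all_categories[index]
-- ===== SOURCE B (Python) =====
-- ALL_CATEGORIES = ['A1', 'B1', 'A', 'B', 'C1', 'C', 'D1', 'D', 'BE', 'C1E', 'CE', 'D1E', 'DE']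
--
-- def getMainCategory(category='B, C1'):
--     wanted = {c.replace(' ', '') for c in category.split(',')}
--     for c in wanted:
--         if c not in ALL_CATEGORIES:
--             raise ValueError(f"{c!r} is not in list")
--     for c in reversed(ALL_CATEGORIES):
--         if c in wanted:
--             return c
-- ===== Notes on version B (the rewrite author's own statement) =====
-- stated objective: alternative
-- what changed: B builds a set of the cleaned input categories once and scans the fixed ranking table from the highest rank down, returning the first member, instead of computing each input item's list index (twice per item via .index) and tracking the maximum index.
import Mathlib
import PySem

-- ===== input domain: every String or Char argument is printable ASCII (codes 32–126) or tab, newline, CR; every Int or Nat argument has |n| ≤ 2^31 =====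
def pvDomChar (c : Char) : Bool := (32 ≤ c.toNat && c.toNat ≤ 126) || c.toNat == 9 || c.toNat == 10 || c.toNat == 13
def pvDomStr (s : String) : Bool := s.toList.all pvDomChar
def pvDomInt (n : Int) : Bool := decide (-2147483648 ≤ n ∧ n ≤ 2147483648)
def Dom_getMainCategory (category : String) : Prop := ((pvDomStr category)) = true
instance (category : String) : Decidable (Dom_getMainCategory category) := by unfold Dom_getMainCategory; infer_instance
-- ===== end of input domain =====

-- B replaces A's per-item .index maximum with one set build plus a single
-- highest-to-lowest scan of the fixed ranking table (objective: alternative decomposition).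

-- the module-level ranking table both versions share
def pvAllCategories : List String :=
  ["A1", "B1", "A", "B", "C1", "C", "D1", "D", "BE", "C1E", "CE", "D1E", "DE"]

-- the cleaned input: [category.replace(' ', '') for category in category.split(',')]
def pvCleaned (category : String) : List String :=
  ((PySem.Str.split? category ",").getD []).map (fun c => PySem.Str.replace c " " "")
  -- split? is always 'some' here: the separator "," is nonempty

-- ===== PORT A =====
def getMainCategory (category : String) : String :=
  let all_categories := pvAllCategories
  let categories_list := pvCleaned category
  let index : Nat := categories_list.foldl
    (fun index c =>
      match PySem.List.index? all_categories c with
      | some j => if index < j then j else index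
      | none => index)  -- Python raises ValueError here; Pre_ excludes such inputs
    0
  all_categories.getD index ""  -- index is always < 13, the default is never used

-- ===== PORT B =====
def getMainCategory_alt (category : String) : String :=
  let wanted : PySem.Set String := PySem.Set.ofList (pvCleaned category)
  -- (B's validation loop raises ValueError on a category outside the table; Pre_ excludes such inputs)
  match pvAllCategories.reverse.find? (fun c => PySem.Set.contains wanted c) with
  | some c => c
  | none => ""  -- unreachable under Pre_: the cleaned list is nonempty and all its members are in the table

-- ===== PRECONDITION & SPEC =====
-- Pre_: exactly the inputs on which A returns (no ValueError from .index):
-- every cleaned input category occurs in the ranking table.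
def Pre_getMainCategory (category : String) : Prop :=
  ∀ c ∈ pvCleaned category, c ∈ pvAllCategories
instance (category : String) : Decidable (Pre_getMainCategory category) := by
  unfold Pre_getMainCategory; infer_instance
def pvWitness_getMainCategory : String := "B, C1"

def Spec_getMainCategory (category : String) (out : String) : Prop := out = getMainCategory_alt category
instance (category : String) (out : String) : Decidable (Spec_getMainCategory category out) := by unfold Spec_getMainCategory; infer_instance

-- ===== CLAIM (what is proved, stated in full; the proofs are below) =====
def Claim_equal_getMainCategory : Prop := ∀ (category : String), Dom_getMainCategory category → Pre_getMainCategory category → Spec_getMainCategory category (getMainCategory category)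

-- ===== LEMMAS AND PROOFS =====

-- A's step function, with every item known to be in the table, is a running maximum of indices.
def pvIdx (c : String) : Nat := (PySem.List.index? pvAllCategories c).getD 0

lemma pvIndex?_eq_idx {c : String} (hc : c ∈ pvAllCategories) :
    PySem.List.index? pvAllCategories c = some (pvIdx c) := by
  have h := (PySem.List.index?_isSome_iff pvAllCategories c).mpr hc
  unfold pvIdx
  cases hx : PySem.List.index? pvAllCategories c with
  | none => rw [hx] at h; simp at h
  | some j => simp

lemma pvIdx_lt {c : String} (hc : c ∈ pvAllCategories) : pvIdx c < pvAllCategories.length := by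
  obtain ⟨hk, -, -⟩ := PySem.List.getElem_of_index?_eq_some (pvIndex?_eq_idx hc)
  exact hk

lemma pvGet_pvIdx {c : String} (hc : c ∈ pvAllCategories) :
    pvAllCategories[pvIdx c]'(pvIdx_lt hc) = c :=
  (PySem.List.getElem_of_index?_eq_some (pvIndex?_eq_idx hc)).choose_spec.1

lemma pvNodup : pvAllCategories.Nodup := by decide

-- nodup: the index of the j-th element is j
lemma pvIdx_getElem {j : Nat} (hj : j < pvAllCategories.length) :
    pvIdx pvAllCategories[j] = j := by
  have hm : pvAllCategories[j] ∈ pvAllCategories := List.getElem_mem hj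
  obtain ⟨hk, hEq, -⟩ := PySem.List.getElem_of_index?_eq_some (pvIndex?_eq_idx hm)
  exact (List.Nodup.getElem_inj_iff pvNodup).mp hEq

-- foldl of the running maximum: upper bound
lemma pvFold_ub (xs : List String) (a : Nat) :
    a ≤ xs.foldl (fun i c => max i (pvIdx c)) a ∧
      ∀ c ∈ xs, pvIdx c ≤ xs.foldl (fun i c => max i (pvIdx c)) a := by
  induction xs generalizing a with
  | nil => simp
  | cons x t ih =>
    obtain ⟨h1, h2⟩ := ih (max a (pvIdx x))
    refine ⟨le_trans (le_max_left _ _) h1, ?_⟩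
    intro c hc
    rcases List.mem_cons.mp hc with rfl | hc
    · exact le_trans (le_max_right _ _) h1
    · exact h2 c hc

-- foldl of the running maximum: the value is the start or attained by some element
lemma pvFold_mem (xs : List String) (a : Nat) :
    xs.foldl (fun i c => max i (pvIdx c)) a = a ∨
      ∃ c ∈ xs, xs.foldl (fun i c => max i (pvIdx c)) a = pvIdx c := by
  induction xs generalizing a with
  | nil => simp
  | cons x t ih =>
    rcases ih (max a (pvIdx x)) with h | ⟨c, hc, h⟩
    · rcases max_choice a (pvIdx x) with hm | hm
      · exact Or.inl (by rw [List.foldl_cons, h, hm])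
      · exact Or.inr ⟨x, List.mem_cons_self, by rw [List.foldl_cons, h, hm]⟩
    · exact Or.inr ⟨c, List.mem_cons_of_mem _ hc, by simpa using h⟩

-- A's foldl equals the running maximum of indices when every element is in the table
lemma pvFoldA_eq (xs : List String) (h : ∀ c ∈ xs, c ∈ pvAllCategories) :
    xs.foldl
      (fun index c =>
        match PySem.List.index? pvAllCategories c with
        | some j => if index < j then j else index
        | none => index) 0
      = xs.foldl (fun i c => max i (pvIdx c)) 0 := by
  apply PySem.List.foldl_congr_mem
  intro acc x hx
  rw [pvIndex?_eq_idx (h x hx)]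
  simp only [Nat.max_def]
  split <;> split <;> omega

-- find? over a reverse returns the element at the last index satisfying the predicate
lemma pvFind_reverse {α : Type} (l : List α) (p : α → Bool) (m : Nat) (hm : m < l.length)
    (hp : p l[m] = true) (hafter : ∀ j (hj : j < l.length), m < j → p l[j] = false) :
    l.reverse.find? p = some l[m] := by
  have hsplit : l = l.take (m + 1) ++ l.drop (m + 1) := (List.take_append_drop _ _).symm
  have htake : l.take (m + 1) = l.take m ++ [l[m]] := by
    rw [List.take_add_one]; simp [List.getElem?_eq_getElem hm]
  calc l.reverse.find? p
      = ((l.drop (m + 1)).reverse ++ (l.take (m + 1)).reverse).find? p := by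
        conv_lhs => rw [hsplit]
        rw [List.reverse_append]
    _ = some l[m] := by
        rw [List.find?_append]
        have hnone : (l.drop (m + 1)).reverse.find? p = none := by
          rw [List.find?_eq_none]
          intro x hx
          rw [List.mem_reverse, List.mem_iff_getElem] at hx
          obtain ⟨i, hi, rfl⟩ := hx
          rw [List.getElem_drop]
          have hi' : m + 1 + i < l.length := by simp [List.length_drop] at hi; omega
          simp [hafter (m + 1 + i) hi' (by omega)]
        rw [hnone, htake, List.reverse_append]
        simp [hp]

-- split's worker never produces an empty list of pieces
lemma pvGo_ne_nil (sep : List Char) : ∀ (fuel : Nat) (l cur : List Char) (acc : List (List Char)),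
    PySem.Chars.splitOn.go sep fuel l cur acc ≠ [] := by
  intro fuel
  induction fuel with
  | zero => intro l cur acc; simp [PySem.Chars.splitOn.go]
  | succ n ih =>
    intro l cur acc
    cases l with
    | nil => simp [PySem.Chars.splitOn.go]
    | cons c rest =>
      rw [PySem.Chars.splitOn.go]
      split
      · exact ih _ _ _
      · exact ih _ _ _

-- the cleaned list is never empty (split always yields at least one piece)
lemma pvCleaned_ne_nil (category : String) : pvCleaned category ≠ [] := by
  unfold pvCleaned
  simp [PySem.Str.split?, PySem.Chars.split?, PySem.Chars.splitOn, pvGo_ne_nil]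

-- Set.contains (ofList xs) c decides membership in xs
lemma pvContains_iff (xs : List String) (c : String) :
    PySem.Set.contains (PySem.Set.ofList xs) c = true ↔ c ∈ xs := by
  simp [PySem.Set.contains, PySem.Set.mem_ofList]

-- ===== VERDICT (by name: the statement is the Claim_ definition above) =====
theorem getMainCategory_spec : Claim_equal_getMainCategory := by
  intro category _ hpre
  unfold Spec_getMainCategory getMainCategory getMainCategory_alt
  simp only []
  set xs := pvCleaned category with hxs
  have hmem : ∀ c ∈ xs, c ∈ pvAllCategories := hpre
  rw [pvFoldA_eq xs hmem]
  set m := xs.foldl (fun i c => max i (pvIdx c)) 0 with hmdef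
  -- m is attained by some element of xs
  obtain ⟨c₀, hc₀, hc₀m⟩ : ∃ c ∈ xs, m = pvIdx c := by
    rcases pvFold_mem xs 0 with h | h
    · -- m = 0: the head of xs has index ≤ 0, hence index 0 = m
      obtain ⟨x, t, hxt⟩ := List.exists_cons_of_ne_nil (pvCleaned_ne_nil category)
      have hxmem : x ∈ xs := by rw [hxs, hxt]; exact List.mem_cons_self
      have hub := (pvFold_ub xs 0).2 x hxmem
      exact ⟨x, hxmem, by omega⟩
    · exact h
  have hc₀AC := hmem c₀ hc₀
  have hmlt : m < pvAllCategories.length := hc₀m ▸ pvIdx_lt hc₀AC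
  have hgetm : pvAllCategories[m]'hmlt = c₀ := by
    revert hmlt; rw [hc₀m]; intro hmlt; exact pvGet_pvIdx hc₀AC
  -- B's reverse scan finds exactly pvAllCategories[m]
  have hfind : pvAllCategories.reverse.find?
      (fun c => PySem.Set.contains (PySem.Set.ofList xs) c) = some (pvAllCategories[m]'hmlt) := by
    apply pvFind_reverse
    · rw [hgetm]; exact (pvContains_iff xs c₀).mpr hc₀
    · intro j hj hmj
      by_contra hcon
      have hcmem : pvAllCategories[j] ∈ xs := by
        rw [Bool.not_eq_false, pvContains_iff] at hcon
        exact hcon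
      have := (pvFold_ub xs 0).2 _ hcmem
      rw [pvIdx_getElem hj] at this
      omega
  rw [hfind]
  simp only []
  exact List.getD_eq_getElem _ _ hmlt
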